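-- pv_equiv track=rewrite | github.com/gosferano/advent-of-code | src/y2021/d04/main.py | mark_draw
-- ===== SOURCE A (Python) =====
-- def mark_draw(board, draw: int) -> tuple:
--     is_winning = False
--     size = len(board[0])
--     score = 0
--     for row, b_row in enumerate(board):
--         for column, b_number in enumerate(b_row):
--             if board[row][column] == draw:
--                 board[row][column] = -1
--                 is_winning = is_winning or (sum([i[column] for i in board]) == -size)
--             elif board[row][column] != -1:
--                 score += board[row][column]
--         is_winning = is_winning or (sum(board[row]) == -size)
--
--     return score * draw, is_winning
-- ===== SOURCE B (Python) =====
-- def mark_draw(board, draw: int) -> tuple: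
--     size = len(board[0])
--     drawn_columns = set()
--     for b_row in board:
--         for c, v in enumerate(b_row):
--             if v == draw:
--                 b_row[c] = -1
--                 drawn_columns.add(c)
--     score = sum(v for b_row in board for v in b_row if v != -1)
--     is_winning = any(sum(b_row) == -size for b_row in board) or any(
--         sum(b_row[c] for b_row in board) == -size for c in drawn_columns)
--     return score * draw, is_winning
-- ===== Notes on version B (the rewrite author's own statement) =====
-- stated objective: alternative
-- what changed: A interleaves marking, scoring and win checks, re-summing an entire column at every cell it marks; B does one marking pass collecting the drawn columns into a set, then computes the score and checks final row sums and final drawn-column sums in separate passes, dropping A's mid-pass column checks (stated as an intended difference).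
-- intended difference: On boards where some partially-marked column's sum coincidentally equals -size mid-pass while no row or drawn column is fully marked, A returns (score*draw, True) and B returns (score*draw, False); B's value is intended since such a board has no completed bingo line. — e.g. on mark_draw([[5, 0], [5, 0], [-6, 0]], 5): A returns (-30, true), B returns (-30, false)
import Mathlib
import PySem

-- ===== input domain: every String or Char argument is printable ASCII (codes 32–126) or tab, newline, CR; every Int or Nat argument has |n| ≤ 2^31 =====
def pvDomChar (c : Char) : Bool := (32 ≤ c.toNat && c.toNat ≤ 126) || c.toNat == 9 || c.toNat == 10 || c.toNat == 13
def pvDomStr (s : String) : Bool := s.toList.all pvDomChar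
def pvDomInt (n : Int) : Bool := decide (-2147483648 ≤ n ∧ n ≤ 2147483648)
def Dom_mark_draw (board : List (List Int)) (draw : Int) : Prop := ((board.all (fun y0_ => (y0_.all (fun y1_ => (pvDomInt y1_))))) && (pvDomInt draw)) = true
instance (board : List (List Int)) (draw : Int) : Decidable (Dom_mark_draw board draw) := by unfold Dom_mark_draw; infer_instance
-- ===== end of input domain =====

-- B marks the board in one pass collecting the drawn columns as a set, then checks final row
-- and drawn-column sums; it drops A's accidental mid-pass column checks (stated as D_ below).
-- Both A and B mark drawn cells of the argument board in place in Python (same mutation);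
-- the theorems are about the returned pair.

-- ===== PORT A =====
/-- `sum([i[column] for i in board])`; exact whenever every row is longer than `c`
    (guaranteed by `Pre_mark_draw` at every check A reaches). -/
def aColSum (rows : List (List Int)) (c : Int) : Int :=
  (rows.map (fun r => PySem.List.pyGetD r c 0)).sum

/-- inner `for column, b_number in enumerate(b_row)` loop of A; the already-mutated prefix of
    the current row is carried as `pfx` (`column = len(pfx)` throughout), `done`/`rest` are the
    rows before/after the current one (mutated/untouched). -/
def aRowLoop (draw size : Int) (done rest : List (List Int)) :
    List Int → List Int → Int → Int → Bool → List Int × Int × Bool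
  | pfx, [], _, score, win => (pfx, score, win)
  | pfx, v :: tl, c, score, win =>
    if v = draw then
      aRowLoop draw size done rest (pfx ++ [-1]) tl (c + 1) score
        (win || (aColSum (done ++ ((pfx ++ [-1]) ++ tl) :: rest) c == -size))
    else if v ≠ -1 then
      aRowLoop draw size done rest (pfx ++ [v]) tl (c + 1) (score + v) win
    else
      aRowLoop draw size done rest (pfx ++ [v]) tl (c + 1) score win

/-- outer `for row, b_row in enumerate(board)` loop of A. -/
def aBoardLoop (draw size : Int) : List (List Int) → List (List Int) → Int → Bool → Int × Bool
  | _, [], score, win => (score, win)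
  | done, r :: tl, score, win =>
    let st := aRowLoop draw size done tl [] r 0 score win
    aBoardLoop draw size (done ++ [st.1]) tl st.2.1 (st.2.2 || (st.1.sum == -size))

def mark_draw (board : List (List Int)) (draw : Int) : Int × Bool :=
  let size : Int := ((board.headD []).length : Int)   -- len(board[0]); Pre_ excludes board = []
  let st := aBoardLoop draw size [] board 0 false
  (st.1 * draw, st.2)

-- ===== PORT B =====
def mark_draw_alt (board : List (List Int)) (draw : Int) : Int × Bool :=
  let size : Int := ((board.headD []).length : Int)   -- len(board[0]); Pre_ excludes board = []
  -- marking pass: mark drawn cells -1, collect their column indices into a set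
  let mc := board.foldl
    (fun (st : List (List Int) × PySem.Set Int) b_row =>
      let rc := (PySem.List.enumerate b_row).foldl
        (fun (st2 : List Int × PySem.Set Int) cv =>
          if cv.2 == draw then (st2.1 ++ [(-1 : Int)], PySem.Set.add st2.2 cv.1)
          else (st2.1 ++ [cv.2], st2.2))
        ([], st.2)
      (st.1 ++ [rc.1], rc.2))
    ([], PySem.Set.empty)
  let marked := mc.1
  let drawn_columns := mc.2
  let score := ((marked.flatten).filter (fun v => !(v == -1))).sum
  let is_winning :=
    marked.any (fun r => r.sum == -size)
      || drawn_columns.any (fun c =>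
           (marked.map (fun r => PySem.List.pyGetD r c 0)).sum == -size)
  (score * draw, is_winning)

-- ===== PRECONDITION & SPEC =====
-- Pre_ excludes (a) the empty board (A raises IndexError on len(board[0])) and (b) boards
-- containing a drawn cell whose column index reaches past the end of some shorter row: there
-- A's column scan raises IndexError unless a win established earlier happens to short-circuit
-- it — a condition not expressible without replaying the loop, so all such boards are excluded.
def Pre_mark_draw (board : List (List Int)) (draw : Int) : Prop :=
  board ≠ [] ∧
  ∀ r ∈ board, ∀ j : Nat, j < r.length → r[j]? = some draw → ∀ r' ∈ board, j < r'.length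
instance (board : List (List Int)) (draw : Int) : Decidable (Pre_mark_draw board draw) := by
  unfold Pre_mark_draw; infer_instance

def pvWitness_mark_draw : List (List Int) × Int := ([[5, 3], [2, 5]], 5)

-- A declares a win whenever a column sum coincidentally equals -size mid-pass, while the
-- column is only partially marked and no row or column is fully marked; there A returns
-- (score*draw, True) and B returns (score*draw, False), which is the intended value since
-- such a board has no completed bingo line.
def D_mark_draw (board : List (List Int)) (draw : Int) : Prop :=
  let M := board.map (List.map fun v => if v = draw then -1 else v)
  let s : Int := ((board.headD []).length : Int)
  let n := fun j : Nat => board.countP (·.getD j (draw + 1) == draw)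
  (∃ j < s.toNat, ∃ k < n j, aColSum M j + (draw + 1) * k = -s) ∧
  -s ∉ M.map List.sum ∧ ∀ j < s.toNat, 0 < n j → aColSum M j ≠ -s
instance (board : List (List Int)) (draw : Int) : Decidable (D_mark_draw board draw) := by
  unfold D_mark_draw; infer_instance

def Spec_mark_draw (board : List (List Int)) (draw : Int) (out : Int × Bool) : Prop :=
  ¬ D_mark_draw board draw → out = mark_draw_alt board draw
instance (board : List (List Int)) (draw : Int) (out : Int × Bool) : Decidable (Spec_mark_draw board draw out) := by unfold Spec_mark_draw; infer_instance

def pvDiffWitness_mark_draw : List (List Int) × Int := ([[5, 0], [5, 0], [-6, 0]], 5)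
def pvDiffWitnessOut_mark_draw : (Int × Bool) × (Int × Bool) := ((-30, true), (-30, false))

-- ===== CLAIM (what is proved, stated in full; the proofs are below) =====
def Claim_unchanged_mark_draw : Prop := ∀ (board : List (List Int)) (draw : Int), Dom_mark_draw board draw → Pre_mark_draw board draw → Spec_mark_draw board draw (mark_draw board draw)
def Claim_changed_mark_draw : Prop := Dom_mark_draw (pvDiffWitness_mark_draw.1) (pvDiffWitness_mark_draw.2) ∧ Pre_mark_draw (pvDiffWitness_mark_draw.1) (pvDiffWitness_mark_draw.2) ∧ D_mark_draw (pvDiffWitness_mark_draw.1) (pvDiffWitness_mark_draw.2) ∧ mark_draw (pvDiffWitness_mark_draw.1) (pvDiffWitness_mark_draw.2) = pvDiffWitnessOut_mark_draw.1 ∧ mark_draw_alt (pvDiffWitness_mark_draw.1) (pvDiffWitness_mark_draw.2) = pvDiffWitnessOut_mark_draw.2 ∧ pvDiffWitnessOut_mark_draw.1 ≠ pvDiffWitnessOut_mark_draw.2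
def Claim_exact_mark_draw : Prop := ∀ (board : List (List Int)) (draw : Int), Dom_mark_draw board draw → Pre_mark_draw board draw → D_mark_draw board draw → mark_draw board draw ≠ mark_draw_alt board draw

-- ===== LEMMAS AND PROOFS =====

/-- value of a cell after the marking pass -/
def mrF (draw v : Int) : Int := if v = draw then -1 else v

/-- a row after the marking pass -/
def mrow (draw : Int) (r : List Int) : List Int := r.map (mrF draw)

/-- number of drawn cells in column `j` -/
def mcount (draw : Int) (rows : List (List Int)) (j : Nat) : Nat :=
  rows.countP (fun r => r[j]? == some draw)

/-- length of the longest row -/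
def maxRowLen (board : List (List Int)) : Nat :=
  board.foldr (fun r m => max r.length m) 0

/-- score contributed by one row -/
def rscoreL (draw : Int) (r : List Int) : Int :=
  (r.filter (fun v => !(v == draw) && !(v == -1))).sum

/-- the win accumulator produced by A's inner loop -/
def rwinB (draw size : Int) (done rest : List (List Int)) : List Int → List Int → Bool
  | _, [] => false
  | pfx, v :: tl =>
    (if v = draw then aColSum (done ++ ((pfx ++ [-1]) ++ tl) :: rest) (pfx.length : Int) == -size else false)
      || rwinB draw size done rest (pfx ++ [mrF draw v]) tl

/-- the win accumulator produced by A's outer loop -/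
def bwinB (draw size : Int) : List (List Int) → List (List Int) → Bool
  | _, [] => false
  | done, r :: tl =>
    ((rwinB draw size done tl [] r) || ((mrow draw r).sum == -size))
      || bwinB draw size (done ++ [mrow draw r]) tl

/-- A's inner-loop win with each column check replaced by its final-board form -/
def rwin2 (draw size : Int) (F post : List (List Int)) : Nat → List Int → Bool
  | _, [] => false
  | c, v :: tl =>
    (if v = draw then (aColSum F (c : Int) + (draw + 1) * (mcount draw post c : Int)) == -size else false)
      || rwin2 draw size F post (c + 1) tl

/-- column-win events of A, row by row -/
def CW (draw size : Int) (F : List (List Int)) : List (List Int) → Prop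
  | [] => False
  | r :: tl =>
    (∃ j : Nat, r[j]? = some draw ∧
        aColSum F (j : Int) + (draw + 1) * (mcount draw tl j : Int) = -size)
      ∨ CW draw size F tl

/-- column indices collected by B from one row (`s` = enumerate start) -/
def dcolsRow (draw : Int) (r : List Int) (s : Int) : List Int :=
  ((PySem.List.enumerate r s).filter (fun cv => cv.2 == draw)).map (·.1)

/-- all column indices collected by B, with multiplicity -/
def dcols (draw : Int) (rows : List (List Int)) : List Int :=
  rows.flatMap (fun r => dcolsRow draw r 0)

lemma colsum_orig (draw : Int) (j : Nat) (post : List (List Int))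
    (h : ∀ p ∈ post, j < p.length) :
    (post.map (fun r => PySem.List.pyGetD r (j : Int) 0)).sum
      = ((post.map (mrow draw)).map (fun r => PySem.List.pyGetD r (j : Int) 0)).sum
        + (draw + 1) * (mcount draw post j : Int) := by
  induction post with
  | nil => simp [mcount]
  | cons p tl ih =>
    have hp : j < p.length := h p (by simp)
    have htl : ∀ q ∈ tl, j < q.length := fun q hq => h q (by simp [hq])
    have h1 : PySem.List.pyGetD p (j : Int) 0 = p[j] := by
      simp [PySem.List.pyGetD_natCast, List.getElem?_eq_getElem hp]
    have h2 : PySem.List.pyGetD (mrow draw p) (j : Int) 0 = mrF draw p[j] := by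
      simp [PySem.List.pyGetD_natCast, mrow, List.getElem?_eq_getElem hp]
    by_cases hd : p[j] = draw
    · have hm : mcount draw (p :: tl) j = mcount draw tl j + 1 := by
        simp [mcount, List.countP_cons, List.getElem?_eq_getElem hp, hd]
      simp only [List.map_cons, List.sum_cons, h1, h2, ih htl, hm, hd, mrF, if_pos]
      push_cast
      ring
    · have hm : mcount draw (p :: tl) j = mcount draw tl j := by
        simp [mcount, List.countP_cons, List.getElem?_eq_getElem hp, hd]
      simp only [List.map_cons, List.sum_cons, h1, h2, ih htl, hm, mrF, if_neg hd]
      ring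

lemma midsum (draw : Int) (pre post : List (List Int)) (r : List Int) (j : Nat)
    (hj : j < r.length) (hrj : r[j] = draw)
    (hpre : ∀ p ∈ pre, j < p.length) (hpost : ∀ p ∈ post, j < p.length) :
    aColSum ((pre.map (mrow draw)) ++ ((mrow draw (r.take j) ++ [-1]) ++ r.drop (j + 1)) :: post) (j : Int)
      = aColSum ((pre ++ r :: post).map (mrow draw)) (j : Int)
        + (draw + 1) * (mcount draw post j : Int) := by
  have hlenpfx : (mrow draw (r.take j)).length = j := by
    simp [mrow, List.length_take, Nat.min_eq_left hj.le]
  have hmid : PySem.List.pyGetD ((mrow draw (r.take j) ++ [-1]) ++ r.drop (j + 1)) (j : Int) 0 = -1 := by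
    have h1 : (mrow draw (r.take j) ++ -1 :: r.drop (j + 1))[j]? = some (-1) := by
      rw [List.getElem?_append_right (by omega)]
      simp [hlenpfx]
    simp [PySem.List.pyGetD_natCast, List.getD_eq_getElem?_getD, h1]
  have hmid2 : PySem.List.pyGetD (mrow draw r) (j : Int) 0 = -1 := by
    simp [PySem.List.pyGetD_natCast, mrow, List.getElem?_eq_getElem hj, mrF, hrj]
  simp only [aColSum, List.map_append, List.map_cons, List.sum_append, List.sum_cons]
  rw [hmid, hmid2, colsum_orig draw j post hpost]
  ring

lemma aRowLoop_eq (draw size : Int) (done rest : List (List Int)) :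
    ∀ (row pfx : List Int) (score : Int) (win : Bool),
      aRowLoop draw size done rest pfx row (pfx.length : Int) score win
        = (pfx ++ mrow draw row, score + rscoreL draw row,
           win || rwinB draw size done rest pfx row) := by
  intro row
  induction row with
  | nil => intro pfx score win; simp [aRowLoop, mrow, rscoreL, rwinB]
  | cons v tl ih =>
    intro pfx score win
    by_cases hv : v = draw
    · rw [aRowLoop, if_pos hv]
      rw [show ((pfx.length : Int) + 1) = (((pfx ++ [(-1 : Int)]).length : Int)) by simp]
      rw [ih]
      simp [mrow, mrF, hv, rscoreL, rwinB, Bool.or_assoc]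
    · by_cases hv1 : v = -1
      · subst hv1
        rw [aRowLoop, if_neg hv, if_neg (by simp)]
        rw [show ((pfx.length : Int) + 1) = (((pfx ++ [(-1 : Int)]).length : Int)) by simp]
        rw [ih]
        simp [mrow, mrF, hv, rscoreL, rwinB]
      · rw [aRowLoop, if_neg hv, if_pos (by simp [hv1])]
        rw [show ((pfx.length : Int) + 1) = (((pfx ++ [v]).length : Int)) by simp]
        rw [ih]
        simp [mrow, mrF, hv, hv1, rscoreL, rwinB, add_assoc]

lemma aBoardLoop_eq (draw size : Int) :
    ∀ (rest done : List (List Int)) (score : Int) (win : Bool),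
      aBoardLoop draw size done rest score win
        = (score + (rest.map (rscoreL draw)).sum, win || bwinB draw size done rest) := by
  intro rest
  induction rest with
  | nil => intro done score win; simp [aBoardLoop, bwinB]
  | cons r tl ih =>
    intro done score win
    rw [aBoardLoop]
    rw [show (0 : Int) = ((([] : List Int)).length : Int) by simp]
    rw [aRowLoop_eq]
    simp only [List.nil_append]
    rw [ih]
    simp [bwinB, Bool.or_assoc, add_assoc]

lemma rwin_eq_rwin2 (draw size : Int) (pre post : List (List Int)) (r : List Int)
    (H : ∀ p ∈ pre ++ r :: post, ∀ j : Nat, j < p.length → p[j]? = some draw →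
          ∀ q ∈ pre ++ r :: post, j < q.length) :
    ∀ (sfx : List Int) (c : Nat), sfx = r.drop c →
      rwinB draw size (pre.map (mrow draw)) post (mrow draw (r.take c)) sfx
        = rwin2 draw size ((pre ++ r :: post).map (mrow draw)) post c sfx := by
  intro sfx
  induction sfx with
  | nil => intro c h; simp [rwinB, rwin2]
  | cons v tl ih =>
    intro c hdrop
    have hc : c < r.length := by
      by_contra hcl
      rw [List.drop_eq_nil_of_le (by omega)] at hdrop
      cases hdrop
    have hv : r[c]? = some v := by
      rw [show c = c + 0 by omega, ← List.getElem?_drop, ← hdrop]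
      rfl
    have hvc : r[c] = v := by
      rcases List.getElem?_eq_some_iff.1 hv with ⟨_, h⟩
      exact h
    have htl : tl = r.drop (c + 1) := by
      rw [← List.tail_drop, ← hdrop]
      rfl
    have hlen : ((mrow draw (r.take c)).length : Int) = (c : Int) := by
      simp [mrow, List.length_take, Nat.min_eq_left hc.le]
    have hstep : mrow draw (r.take c) ++ [mrF draw v] = mrow draw (r.take (c + 1)) := by
      simp [mrow, List.take_succ, List.getElem?_eq_getElem hc, hvc]
    rw [rwinB, rwin2, hlen, hstep, ih (c + 1) htl]
    congr 1
    by_cases hvd : v = draw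
    · rw [if_pos hvd, if_pos hvd]
      have hrmem : r ∈ pre ++ r :: post := by simp
      have hdrw : r[c]? = some draw := by rw [hv, hvd]
      have hpre : ∀ p ∈ pre, c < p.length := fun p hp =>
        H r hrmem c hc hdrw p (by simp [hp])
      have hpost : ∀ p ∈ post, c < p.length := fun p hp =>
        H r hrmem c hc hdrw p (by simp [hp])
      rw [htl, midsum draw pre post r c hc (by rw [hvc, hvd]) hpre hpost]
    · rw [if_neg hvd, if_neg hvd]

lemma rwin2_char (draw size : Int) (F post : List (List Int)) :
    ∀ (sfx : List Int) (c : Nat),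
      rwin2 draw size F post c sfx = true ↔
        ∃ j : Nat, sfx[j]? = some draw ∧
          aColSum F ((c + j : Nat) : Int) + (draw + 1) * (mcount draw post (c + j) : Int) = -size := by
  intro sfx
  induction sfx with
  | nil => intro c; simp [rwin2]
  | cons v tl ih =>
    intro c
    rw [rwin2]
    simp only [Bool.or_eq_true, ih (c + 1)]
    constructor
    · rintro (h | ⟨j, hj, hval⟩)
      · by_cases hvd : v = draw
        · refine ⟨0, by simp [hvd], ?_⟩
          rw [if_pos hvd] at h
          simpa using beq_iff_eq.1 h
        · rw [if_neg hvd] at h; cases h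
      · refine ⟨j + 1, by simpa using hj, ?_⟩
        have he : c + 1 + j = c + (j + 1) := by omega
        rw [he] at hval
        exact hval
    · rintro ⟨j, hj, hval⟩
      cases j with
      | zero =>
        left
        have hvd : v = draw := by simpa using hj
        rw [if_pos hvd]
        simp only [Nat.add_zero] at hval
        exact beq_iff_eq.2 hval
      | succ j' =>
        right
        refine ⟨j', by simpa using hj, ?_⟩
        have he : c + (j' + 1) = c + 1 + j' := by omega
        rw [he] at hval
        exact hval

lemma bwin_char (draw size : Int) (board : List (List Int))
    (H : ∀ p ∈ board, ∀ j : Nat, j < p.length → p[j]? = some draw →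
          ∀ q ∈ board, j < q.length) :
    ∀ (post pre : List (List Int)), board = pre ++ post →
      (bwinB draw size (pre.map (mrow draw)) post = true ↔
        (∃ r ∈ post, (mrow draw r).sum = -size)
          ∨ CW draw size (board.map (mrow draw)) post) := by
  intro post
  induction post with
  | nil => intro pre hb; simp [bwinB, CW]
  | cons r tl ih =>
    intro pre hb
    subst hb
    rw [bwinB]
    simp only [Bool.or_eq_true]
    have h1 : rwinB draw size (pre.map (mrow draw)) tl [] r
        = rwin2 draw size ((pre ++ r :: tl).map (mrow draw)) tl 0 r := by
      have h0 : ([] : List Int) = mrow draw (r.take 0) := by simp [mrow]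
      rw [h0]
      exact rwin_eq_rwin2 draw size pre tl r H r 0 (by simp)
    have h2 := rwin2_char draw size ((pre ++ r :: tl).map (mrow draw)) tl r 0
    have h3 := ih (pre ++ [r]) (by simp)
    rw [List.map_append] at h3
    simp only [List.map_cons, List.map_nil] at h3
    rw [h1]
    simp only [Bool.or_eq_true, h2, h3, CW, List.mem_cons, beq_iff_eq, Nat.zero_add,
      or_and_right, exists_or, exists_eq_left]
    constructor
    · rintro ((h | h) | (h | h))
      · exact Or.inr (Or.inl h)
      · exact Or.inl (Or.inl h)
      · exact Or.inl (Or.inr h)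
      · exact Or.inr (Or.inr h)
    · rintro ((h | h) | (h | h))
      · exact Or.inl (Or.inr h)
      · exact Or.inr (Or.inl h)
      · exact Or.inl (Or.inl h)
      · exact Or.inr (Or.inr h)

lemma CW_char (draw size : Int) (F : List (List Int)) :
    ∀ rows, CW draw size F rows ↔
      ∃ j k : Nat, k < mcount draw rows j ∧
        aColSum F (j : Int) + (draw + 1) * (k : Int) = -size := by
  intro rows
  induction rows with
  | nil => simp [CW, mcount]
  | cons r tl ih =>
    have hcnt : ∀ j : Nat, mcount draw (r :: tl) j
        = mcount draw tl j + (if r[j]? = some draw then 1 else 0) := by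
      intro j
      simp [mcount, List.countP_cons]
    simp only [CW, ih]
    constructor
    · rintro (⟨j, hj, hval⟩ | ⟨j, k, hk, hval⟩)
      · exact ⟨j, mcount draw tl j, by rw [hcnt]; simp [hj], hval⟩
      · exact ⟨j, k, by rw [hcnt]; omega, hval⟩
    · rintro ⟨j, k, hk, hval⟩
      rw [hcnt] at hk
      by_cases hit : r[j]? = some draw
      · rw [if_pos hit] at hk
        rcases Nat.lt_succ_iff_lt_or_eq.1 hk with h | h
        · exact Or.inr ⟨j, k, h, hval⟩
        · subst h; exact Or.inl ⟨j, hit, hval⟩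
      · rw [if_neg hit] at hk
        exact Or.inr ⟨j, k, by omega, hval⟩

lemma fold_add_if {α : Type} (p : α → Bool) (f : α → Int) :
    ∀ (xs : List α) (s : PySem.Set Int),
      xs.foldl (fun a cv => if p cv then PySem.Set.add a (f cv) else a) s
        = PySem.Set.update s ((xs.filter p).map f) := by
  intro xs
  induction xs with
  | nil => intro s; simp [PySem.Set.update]
  | cons x tl ih =>
    intro s
    by_cases hx : p x = true
    · simp only [List.foldl_cons, hx, if_pos, List.filter_cons_of_pos hx, List.map_cons]
      rw [ih]
      rfl
    · have hx' : p x = false := by simpa using hx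
      rw [List.foldl_cons, if_neg hx, List.filter_cons_of_neg (by simp [hx']), ih]

lemma inner_fold_eq (draw : Int) :
    ∀ (r : List Int) (acc2 : PySem.Set Int) (s : Int),
      (PySem.List.enumerate r s).foldl
          (fun (st2 : List Int × PySem.Set Int) cv =>
            if cv.2 == draw then (st2.1 ++ [(-1 : Int)], PySem.Set.add st2.2 cv.1)
            else (st2.1 ++ [cv.2], st2.2))
          ([], acc2)
        = (mrow draw r, PySem.Set.update acc2 (dcolsRow draw r s)) := by
  intro r acc2 s
  have hfun : (fun (st2 : List Int × PySem.Set Int) (cv : Int × Int) =>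
        if cv.2 == draw then (st2.1 ++ [(-1 : Int)], PySem.Set.add st2.2 cv.1)
        else (st2.1 ++ [cv.2], st2.2))
      = (fun st2 cv => (st2.1 ++ [mrF draw cv.2],
          if cv.2 == draw then PySem.Set.add st2.2 cv.1 else st2.2)) := by
    funext st2 cv
    by_cases h : cv.2 = draw <;> simp [mrF, h]
  rw [hfun, PySem.List.foldl_prod_mk (f := fun a cv => a ++ [mrF draw cv.2])
      (g := fun a (cv : Int × Int) => if cv.2 == draw then PySem.Set.add a cv.1 else a)]
  rw [PySem.List.foldl_append_singleton_eq_map,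
      fold_add_if (fun cv : Int × Int => cv.2 == draw) (fun cv : Int × Int => cv.1)]
  refine Prod.ext ?_ rfl
  show [] ++ (PySem.List.enumerate r s).map (fun cv => mrF draw cv.2) = mrow draw r
  rw [List.nil_append, show (fun cv : Int × Int => mrF draw cv.2)
      = (mrF draw) ∘ (fun cv : Int × Int => cv.2) from rfl, ← List.map_map,
      PySem.List.map_snd_enumerate]
  rfl

lemma marking_fold_eq (draw : Int) (board : List (List Int)) :
    board.foldl
        (fun (st : List (List Int) × PySem.Set Int) b_row =>
          let rc := (PySem.List.enumerate b_row).foldl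
            (fun (st2 : List Int × PySem.Set Int) cv =>
              if cv.2 == draw then (st2.1 ++ [(-1 : Int)], PySem.Set.add st2.2 cv.1)
              else (st2.1 ++ [cv.2], st2.2))
            ([], st.2)
          (st.1 ++ [rc.1], rc.2))
        ([], PySem.Set.empty)
      = (board.map (mrow draw), PySem.Set.ofList (dcols draw board)) := by
  have hfun : (fun (st : List (List Int) × PySem.Set Int) (b_row : List Int) =>
        let rc := (PySem.List.enumerate b_row).foldl
          (fun (st2 : List Int × PySem.Set Int) cv =>
            if cv.2 == draw then (st2.1 ++ [(-1 : Int)], PySem.Set.add st2.2 cv.1)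
            else (st2.1 ++ [cv.2], st2.2))
          ([], st.2)
        (st.1 ++ [rc.1], rc.2))
      = (fun st b_row => (st.1 ++ [mrow draw b_row], PySem.Set.update st.2 (dcolsRow draw b_row 0))) := by
    funext st b_row
    simp only [inner_fold_eq]
  rw [hfun, PySem.List.foldl_prod_mk (f := fun a r => a ++ [mrow draw r])
      (g := fun a r => PySem.Set.update a (dcolsRow draw r 0))]
  rw [PySem.List.foldl_append_singleton_eq_map]
  refine Prod.ext (by simp) ?_
  show board.foldl (fun a r => PySem.Set.update a (dcolsRow draw r 0)) PySem.Set.empty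
      = PySem.Set.ofList (dcols draw board)
  rw [PySem.Set.ofList_eq_foldl]
  show _ = (dcols draw board).foldl PySem.Set.add PySem.Set.empty
  rw [dcols]
  induction board using List.reverseRecOn with
  | nil => simp [dcols]
  | append_singleton tl r ih =>
    rw [List.foldl_append, List.flatMap_append, List.foldl_append, ih]
    simp [PySem.Set.update, List.foldl_append]

lemma filter_mrow (draw : Int) :
    ∀ r : List Int, (mrow draw r).filter (fun v => !(v == -1))
      = r.filter (fun v => !(v == draw) && !(v == -1)) := by
  intro r
  induction r with
  | nil => simp [mrow]
  | cons v tl ih =>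
    by_cases hv : v = draw
    · simp [mrow, mrF, hv, List.filter_cons] at ih ⊢
      simpa [mrow] using ih
    · by_cases hv1 : v = -1
      · simp [mrow, mrF, hv, hv1, List.filter_cons] at ih ⊢
        simpa [mrow] using ih
      · simp [mrow, mrF, hv, hv1, List.filter_cons] at ih ⊢
        simpa [mrow] using ih

lemma score_eq (draw : Int) :
    ∀ rows : List (List Int),
      (((rows.map (mrow draw)).flatten).filter (fun v => !(v == -1))).sum
        = (rows.map (rscoreL draw)).sum := by
  intro rows
  induction rows with
  | nil => simp
  | cons r tl ih =>
    simp only [List.map_cons, List.flatten_cons, List.filter_append, List.sum_append,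
      List.sum_cons, filter_mrow, rscoreL]
    rw [ih]

lemma dcolsRow_mem (draw : Int) (r : List Int) (s c : Int) :
    c ∈ dcolsRow draw r s ↔ ∃ j : Nat, ∃ _ : j < r.length, c = s + j ∧ r[j] = draw := by
  constructor
  · intro hmem
    rcases List.mem_map.1 hmem with ⟨cv, hcv, rfl⟩
    rcases List.mem_filter.1 hcv with ⟨henum, hb⟩
    rcases (PySem.List.mem_enumerate_iff _ _ _).1 henum with ⟨k, hk, heq⟩
    subst heq
    exact ⟨k, hk, rfl, beq_iff_eq.1 hb⟩
  · rintro ⟨j, hj, rfl, hdraw⟩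
    exact List.mem_map.2 ⟨(s + (j : Int), r[j]),
      List.mem_filter.2 ⟨(PySem.List.mem_enumerate_iff _ _ _).2 ⟨j, hj, rfl⟩, by simp [hdraw]⟩, rfl⟩

lemma dcols_mem (draw : Int) (rows : List (List Int)) (j : Nat) :
    ((j : Nat) : Int) ∈ dcols draw rows ↔ 0 < mcount draw rows j := by
  rw [dcols, List.mem_flatMap]
  constructor
  · rintro ⟨r, hr, hmem⟩
    rcases (dcolsRow_mem draw r 0 _).1 hmem with ⟨j', hj', heq, hd⟩
    have : j' = j := by omega
    subst this
    rw [mcount, List.countP_pos_iff]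
    exact ⟨r, hr, by simp [List.getElem?_eq_getElem hj', hd]⟩
  · intro h
    rcases List.countP_pos_iff.1 h with ⟨r, hr, hp⟩
    have hd : r[j]? = some draw := by simpa using hp
    rcases List.getElem?_eq_some_iff.1 hd with ⟨hlt, hval⟩
    exact ⟨r, hr, (dcolsRow_mem draw r 0 _).2 ⟨j, hlt, by simp, hval⟩⟩

lemma dcols_nonneg (draw : Int) (rows : List (List Int)) :
    ∀ c ∈ dcols draw rows, 0 ≤ c := by
  intro c hc
  rcases List.mem_flatMap.1 hc with ⟨r, _, hr⟩
  rcases (dcolsRow_mem draw r 0 c).1 hr with ⟨j, hj, rfl, _⟩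
  omega

lemma len_le_maxRowLen (board : List (List Int)) (r : List Int) (hr : r ∈ board) :
    r.length ≤ maxRowLen board := by
  induction board with
  | nil => cases hr
  | cons q tl ih =>
    rcases List.mem_cons.1 hr with h | h
    · subst h; simp [maxRowLen]
    · calc r.length ≤ maxRowLen tl := ih h
        _ ≤ maxRowLen (q :: tl) := by simp [maxRowLen]

lemma mcount_lt_maxRowLen (draw : Int) (board : List (List Int)) (j : Nat)
    (h : 0 < mcount draw board j) : j < maxRowLen board := by
  rcases List.countP_pos_iff.1 h with ⟨r, hr, hp⟩
  have hd : r[j]? = some draw := by simpa using hp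
  rcases List.getElem?_eq_some_iff.1 hd with ⟨hlt, _⟩
  have := len_le_maxRowLen board r hr
  omega

lemma getD_draw_iff (draw : Int) (r : List Int) (j : Nat) :
    (r.getD j (draw + 1) == draw) = (r[j]? == some draw) := by
  rcases h : r[j]? with _ | v
  · simp [List.getD, h]
  · simp [List.getD, h]

/-- the compact `D_mark_draw` unfolded to the proof-side vocabulary -/
lemma mcount_lt_head (board : List (List Int)) (draw : Int) (j : Nat)
    (hpre : Pre_mark_draw board draw) (h : 0 < mcount draw board j) :
    j < (board.headD []).length := by
  obtain ⟨hne, HP⟩ := hpre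
  rcases List.countP_pos_iff.1 h with ⟨r, hr, hp⟩
  have hd : r[j]? = some draw := by simpa using hp
  rcases List.getElem?_eq_some_iff.1 hd with ⟨hlt, _⟩
  have hhm : board.headD [] ∈ board := by
    cases board with
    | nil => exact absurd rfl hne
    | cons q tl => simp
  exact HP r hr j hlt hd (board.headD []) hhm

lemma D_char (board : List (List Int)) (draw : Int) (hpre : Pre_mark_draw board draw) :
    D_mark_draw board draw ↔
      ((∃ j < maxRowLen board, ∃ k < mcount draw board j, 1 ≤ k ∧
          aColSum (board.map (mrow draw)) (j : Int) + (draw + 1) * (k : Int)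
            = -((board.headD []).length : Int)) ∧
       (∀ r ∈ board, (mrow draw r).sum ≠ -((board.headD []).length : Int)) ∧
       (∀ j < maxRowLen board, 0 < mcount draw board j →
          aColSum (board.map (mrow draw)) (j : Int) ≠ -((board.headD []).length : Int))) := by
  have hM : board.map (List.map fun v => if v = draw then -1 else v) = board.map (mrow draw) := by
    simp [mrow, mrF]
  have hn : ∀ j : Nat, board.countP (fun r => r.getD j (draw + 1) == draw) = mcount draw board j := by
    intro j
    rw [mcount]
    exact List.countP_congr (fun r _ => by rw [getD_draw_iff])
  have hs : (((board.headD []).length : Int)).toNat = (board.headD []).length := Int.toNat_natCast _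
  rw [D_mark_draw]
  simp only [hM, hn, hs]
  constructor
  · rintro ⟨⟨j, hjH, k, hk, hval⟩, hrow, hcol⟩
    have hk1 : 1 ≤ k := by
      by_contra hk0
      have hk0' : k = 0 := by omega
      subst hk0'
      simp only [Nat.cast_zero, mul_zero, add_zero] at hval
      exact hcol j hjH (by omega) hval
    refine ⟨⟨j, mcount_lt_maxRowLen draw board j (by omega), k, hk, hk1, hval⟩, ?_, ?_⟩
    · intro r hr hsum
      exact hrow (List.mem_map.2 ⟨mrow draw r, List.mem_map.2 ⟨r, hr, rfl⟩, hsum⟩)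
    · intro j _ hc
      exact hcol j (mcount_lt_head board draw j hpre hc) hc
  · rintro ⟨⟨j, hjm, k, hk, hk1, hval⟩, hrow, hcol⟩
    refine ⟨⟨j, mcount_lt_head board draw j hpre (by omega), k, hk, hval⟩, ?_, ?_⟩
    · intro hmem
      rcases List.mem_map.1 hmem with ⟨r', hr', hsum⟩
      rcases List.mem_map.1 hr' with ⟨r, hr, rfl⟩
      exact hrow r hr hsum
    · intro j _ hc
      exact hcol j (mcount_lt_maxRowLen draw board j hc) hc

/-- A's result in closed form: final score and row wins / mid-pass column wins. -/
lemma markA_eq (board : List (List Int)) (draw : Int)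
    (H : ∀ p ∈ board, ∀ j : Nat, j < p.length → p[j]? = some draw →
          ∀ q ∈ board, j < q.length) :
    mark_draw board draw
      = ((board.map (rscoreL draw)).sum * draw,
         bwinB draw ((board.headD []).length : Int) [] board) := by
  simp only [mark_draw, aBoardLoop_eq, zero_add, Bool.false_or]

/-- B's result in closed form. -/
lemma markB_eq (board : List (List Int)) (draw : Int) :
    mark_draw_alt board draw
      = ((board.map (rscoreL draw)).sum * draw,
         (board.map (mrow draw)).any (fun r => r.sum == -((board.headD []).length : Int))
           || (PySem.Set.ofList (dcols draw board)).any (fun c =>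
                ((board.map (mrow draw)).map (fun r => PySem.List.pyGetD r c 0)).sum
                  == -((board.headD []).length : Int))) := by
  simp only [mark_draw_alt, marking_fold_eq draw board, score_eq]

/-- B's column check as a proposition. -/
lemma colAny_char (board : List (List Int)) (draw size : Int) :
    ((PySem.Set.ofList (dcols draw board)).any (fun c =>
        ((board.map (mrow draw)).map (fun r => PySem.List.pyGetD r c 0)).sum == -size) = true)
      ↔ ∃ j : Nat, 0 < mcount draw board j ∧
          aColSum (board.map (mrow draw)) (j : Int) = -size := by
  rw [List.any_eq_true]
  constructor
  · rintro ⟨c, hc, hval⟩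
    have hcd : c ∈ dcols draw board := (PySem.Set.mem_ofList _ _).1 hc
    have hc0 : 0 ≤ c := dcols_nonneg draw board c hcd
    have hcc : ((c.toNat : Nat) : Int) = c := Int.toNat_of_nonneg hc0
    refine ⟨c.toNat, (dcols_mem draw board c.toNat).1 (by rw [hcc]; exact hcd), ?_⟩
    rw [aColSum, hcc]
    exact beq_iff_eq.1 hval
  · rintro ⟨j, hj, hval⟩
    exact ⟨((j : Nat) : Int), (PySem.Set.mem_ofList _ _).2 ((dcols_mem draw board j).2 hj),
      beq_iff_eq.2 (by rw [aColSum] at hval; exact hval)⟩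

/-- B's row check as a proposition. -/
lemma rowAny_char (board : List (List Int)) (draw size : Int) :
    ((board.map (mrow draw)).any (fun r => r.sum == -size) = true)
      ↔ ∃ r ∈ board, (mrow draw r).sum = -size := by
  rw [List.any_eq_true]
  constructor
  · rintro ⟨r', hr', hs⟩
    rcases List.mem_map.1 hr' with ⟨r, hr, rfl⟩
    exact ⟨r, hr, beq_iff_eq.1 hs⟩
  · rintro ⟨r, hr, hs⟩
    exact ⟨mrow draw r, List.mem_map.2 ⟨r, hr, rfl⟩, beq_iff_eq.2 hs⟩

/-- A's win ⇔ B's win ∨ a mid-pass-only column hit (k ≥ 1). -/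
lemma awin_split (board : List (List Int)) (draw : Int)
    (H : ∀ p ∈ board, ∀ j : Nat, j < p.length → p[j]? = some draw →
          ∀ q ∈ board, j < q.length) :
    (bwinB draw ((board.headD []).length : Int) [] board = true)
      ↔ ((∃ r ∈ board, (mrow draw r).sum = -((board.headD []).length : Int))
          ∨ (∃ j : Nat, 0 < mcount draw board j ∧
              aColSum (board.map (mrow draw)) (j : Int) = -((board.headD []).length : Int)))
        ∨ (∃ j < maxRowLen board, ∃ k < mcount draw board j, 1 ≤ k ∧
            aColSum (board.map (mrow draw)) (j : Int) + (draw + 1) * (k : Int)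
              = -((board.headD []).length : Int)) := by
  have hbw := bwin_char draw ((board.headD []).length : Int) board H board [] (by simp)
  simp only [List.map_nil] at hbw
  rw [hbw, CW_char]
  constructor
  · rintro (h | ⟨j, k, hk, hval⟩)
    · exact Or.inl (Or.inl h)
    · cases Nat.eq_zero_or_pos k with
      | inl h0 =>
        subst h0
        simp only [Nat.cast_zero, mul_zero, add_zero] at hval
        exact Or.inl (Or.inr ⟨j, by omega, hval⟩)
      | inr h1 =>
        exact Or.inr ⟨j, mcount_lt_maxRowLen draw board j (by omega), k, hk, h1, hval⟩
  · rintro ((h | ⟨j, hj, hval⟩) | ⟨j, _, k, hk, _, hval⟩)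
    · exact Or.inl h
    · exact Or.inr ⟨j, 0, hj, by simpa using hval⟩
    · exact Or.inr ⟨j, k, hk, hval⟩

-- ===== VERDICT (by name: the statements are the Claim_ definitions above) =====
theorem mark_draw_spec : Claim_unchanged_mark_draw := by
  intro board draw hdom hpre
  unfold Spec_mark_draw
  intro hnD
  rw [D_char board draw hpre] at hnD
  obtain ⟨hne, H⟩ := hpre
  rw [markA_eq board draw H, markB_eq board draw]
  refine Prod.ext rfl ?_
  have hsplit := awin_split board draw H
  have hrow := rowAny_char board draw (((board.headD []).length : Int))
  have hcol := colAny_char board draw (((board.headD []).length : Int))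
  push_neg at hnD
  show bwinB draw ((board.headD []).length : Int) [] board = _
  by_cases hB : (((board.map (mrow draw)).any (fun r => r.sum == -((board.headD []).length : Int))
      || (PySem.Set.ofList (dcols draw board)).any (fun c =>
          ((board.map (mrow draw)).map (fun r => PySem.List.pyGetD r c 0)).sum
            == -((board.headD []).length : Int))) = true)
  · rw [hB]
    rw [Bool.or_eq_true] at hB
    rcases hB with h | h
    · exact hsplit.2 (Or.inl (Or.inl (hrow.1 h)))
    · exact hsplit.2 (Or.inl (Or.inr (hcol.1 h)))
  · rw [Bool.eq_false_iff.2 hB]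
    rw [Bool.or_eq_true, not_or] at hB
    obtain ⟨hr, hc⟩ := hB
    apply Bool.eq_false_iff.2
    intro hA
    rcases hsplit.1 hA with (h | h) | hmid
    · exact hr (hrow.2 h)
    · exact hc (hcol.2 h)
    · have hrP : ∀ r ∈ board, (mrow draw r).sum ≠ -((board.headD []).length : Int) := by
        intro r hrm hs
        exact hr (hrow.2 ⟨r, hrm, hs⟩)
      have hcP : ∀ j < maxRowLen board, 0 < mcount draw board j →
          aColSum (board.map (mrow draw)) (j : Int) ≠ -((board.headD []).length : Int) := by
        intro j _ hj hs
        exact hc (hcol.2 ⟨j, hj, hs⟩)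
      rcases hnD hmid hrP with ⟨j, hjlt, hj, hs⟩
      exact hcP j hjlt hj hs
      
theorem mark_draw_changed : Claim_changed_mark_draw := by
  unfold Claim_changed_mark_draw; decide

theorem mark_draw_tight : Claim_exact_mark_draw := by
  intro board draw hdom hpre hD
  rw [D_char board draw hpre] at hD
  obtain ⟨hne, H⟩ := hpre
  obtain ⟨hmid, hrP, hcP⟩ := hD
  rw [markA_eq board draw H, markB_eq board draw]
  intro hcontra
  have h2 := congrArg Prod.snd hcontra
  simp only at h2
  have hA : bwinB draw ((board.headD []).length : Int) [] board = true :=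
    (awin_split board draw H).2 (Or.inr hmid)
  rw [hA] at h2
  have h2' := h2.symm
  rw [Bool.or_eq_true] at h2'
  rcases h2' with h | h
  · rcases (rowAny_char board draw _).1 h with ⟨r, hr, hs⟩
    exact hrP r hr hs
  · rcases (colAny_char board draw _).1 h with ⟨j, hj, hs⟩
    exact hcP j (mcount_lt_maxRowLen draw board j hj) hj hs
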